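-- pv_equiv track=rewrite | github.com/subhande/dsa | sliding_window__two_pointers/constant_window/maximum_points_you_can_obtain_from_cards.py | maxScoreSlidingWindow
-- ===== SOURCE A (Python) =====
-- from typing import List
--
-- def maxScoreSlidingWindow(card_points: List[int], k: int) -> int:
--     """
--     Calculates the maximum score by picking k cards from either end using a sliding window.
--
--     Approach:
--     - Concatenate the last k and first k cards to simulate all possible combinations.
--     - Use a sliding window of size k to find the maximum sum.
--
--     Args:
--         card_points (List[int]): List of integers representing points on each card.
--         k (int): Number of cards to pick.
--
--     Returns:
--         int: Maximum score possible.
--     """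
--     # Form a window that can slide across both ends
--     window = card_points[-k:] + card_points[:k]
--     n = len(window)
--     current_window_sum = sum(window[:k])
--     max_score = current_window_sum
--     left = 0
--     right = k - 1
--
--     # Slide the window to the right and update max_score
--     while right < n - 1:
--         current_window_sum -= window[left]
--         left += 1
--         right += 1
--         current_window_sum += window[right]
--         max_score = max(max_score, current_window_sum)
--     return max_score
-- ===== SOURCE B (Python) =====
-- def maxScoreSlidingWindow(card_points, k):
--     """Maximum score picking k cards from either end, via prefix sums.
--
--     Build the same two-ends list as the straightforward approach, but instead
--     of maintaining an incremental running window sum, precompute its prefix-sum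
--     array once and take the maximum of direct window-sum differences
--     prefix[j+k] - prefix[j] (prefix[min(k, n)] is the first window's sum,
--     i.e. sum(ends[:k]) with Python's slice clamping).
--     """
--     ends = card_points[-k:] + card_points[:k]
--     prefix = [0]
--     for x in ends:
--         prefix.append(prefix[-1] + x)
--     n = len(ends)
--     best = prefix[min(k, n)]
--     for j in range(1, n - k + 1):
--         best = max(best, prefix[j + k] - prefix[j])
--     return best
-- ===== Notes on version B (the rewrite author's own statement) =====
-- stated objective: alternative
-- what changed: B replaces A's incremental running-window-sum sweep (subtract left, add right, track max) by precomputing the prefix-sum array of the two-ends list once and taking the maximum of the direct window-sum differences prefix[j+k]-prefix[j].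
import Mathlib
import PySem

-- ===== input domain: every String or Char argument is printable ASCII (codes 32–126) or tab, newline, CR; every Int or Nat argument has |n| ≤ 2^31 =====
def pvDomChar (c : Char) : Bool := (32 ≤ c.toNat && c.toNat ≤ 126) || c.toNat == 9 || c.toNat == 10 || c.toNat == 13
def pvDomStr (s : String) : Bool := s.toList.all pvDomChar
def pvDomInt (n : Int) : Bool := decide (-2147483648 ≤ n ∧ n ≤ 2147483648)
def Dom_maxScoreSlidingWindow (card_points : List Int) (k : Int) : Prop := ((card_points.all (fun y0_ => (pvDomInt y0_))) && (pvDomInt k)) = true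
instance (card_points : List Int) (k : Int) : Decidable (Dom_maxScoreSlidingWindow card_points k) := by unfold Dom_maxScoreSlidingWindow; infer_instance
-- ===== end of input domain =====

-- B replaces A's incremental running-window-sum sweep by a precomputed
-- prefix-sum array of the two-ends list and a max of direct window-sum
-- differences: an alternative decomposition of the same task.


-- ===== PORT A =====
-- the while loop of A, fuel-bounded (fuel = window length suffices: the loop
-- runs at most n - k ≤ n times); window[left]/window[right] are in range
-- whenever the loop body runs, so pyGetD is exact there
def maxScoreAWhile (window : List Int) (n : Int) (fuel : Nat)
    (cws maxScore left right : Int) : Int :=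
  match fuel with
  | 0 => maxScore
  | f + 1 =>
    if right < n - 1 then
      let cws' := cws - PySem.List.pyGetD window left 0
      let left' := left + 1
      let right' := right + 1
      let cws'' := cws' + PySem.List.pyGetD window right' 0
      maxScoreAWhile window n f cws'' (max maxScore cws'') left' right'
    else maxScore

def maxScoreSlidingWindow (card_points : List Int) (k : Int) : Int :=
  let window := PySem.List.slice card_points (some (-k)) none
                ++ PySem.List.slice card_points none (some k)
  let n : Int := window.length
  let current_window_sum := (PySem.List.slice window none (some k)).sum
  let max_score := current_window_sum
  let left : Int := 0
  let right : Int := k - 1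
  maxScoreAWhile window n window.length current_window_sum max_score left right

-- ===== PORT B =====
-- prefix[-1] is pyGetD prefix (-1) 0 (prefix is never empty); the j-loop is a
-- fold over range(1, n - k + 1)
def maxScoreSlidingWindow_alt (card_points : List Int) (k : Int) : Int :=
  let ends := PySem.List.slice card_points (some (-k)) none
              ++ PySem.List.slice card_points none (some k)
  let pre := ends.foldl (fun p x => p ++ [PySem.List.pyGetD p (-1) 0 + x]) [(0 : Int)]
  let n : Int := ends.length
  let best := PySem.List.pyGetD pre (min k n) 0
  (PySem.List.pyRange 1 (n - k + 1) 1).foldl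
    (fun b j => max b (PySem.List.pyGetD pre (j + k) 0 - PySem.List.pyGetD pre j 0))
    best

-- ===== PRECONDITION & SPEC =====
-- Pre_ excludes exactly k < 0, where A raises IndexError (its loop walks past
-- the end of the shrunken window); A returns normally on every k ≥ 0.
def Pre_maxScoreSlidingWindow (card_points : List Int) (k : Int) : Prop := 0 ≤ k
instance (card_points : List Int) (k : Int) : Decidable (Pre_maxScoreSlidingWindow card_points k) := by unfold Pre_maxScoreSlidingWindow; infer_instance

def pvWitness_maxScoreSlidingWindow : List Int × Int := ([3, 1, 4, 1, 5], 2)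

def Spec_maxScoreSlidingWindow (card_points : List Int) (k : Int) (out : Int) : Prop := out = maxScoreSlidingWindow_alt card_points k
instance (card_points : List Int) (k : Int) (out : Int) : Decidable (Spec_maxScoreSlidingWindow card_points k out) := by unfold Spec_maxScoreSlidingWindow; infer_instance

-- ===== CLAIM (what is proved, stated in full; the proofs are below) =====
def Claim_equal_maxScoreSlidingWindow : Prop := ∀ (card_points : List Int) (k : Int), Dom_maxScoreSlidingWindow card_points k → Pre_maxScoreSlidingWindow card_points k → Spec_maxScoreSlidingWindow card_points k (maxScoreSlidingWindow card_points k)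

-- ===== LEMMAS AND PROOFS =====

-- sum of the length-kn window of w starting at t
def winSum (w : List Int) (kn t : Nat) : Int := ((w.drop t).take kn).sum

theorem winSum_slide (w : List Int) (kn j : Nat) (h : j + kn < w.length) :
    winSum w kn (j+1) = winSum w kn j - w.getD j 0 + w.getD (j+kn) 0 := by
  have hj : j < w.length := by omega
  have h1 : (w.drop j).take (kn+1) = w[j] :: (w.drop (j+1)).take kn := by
    rw [List.drop_eq_getElem_cons hj]; rfl
  have h2 : (w.drop j).take (kn+1) = (w.drop j).take kn ++ [(w.drop j)[kn]'(by
      simpa using by omega : kn < (w.drop j).length)] := by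
    rw [List.take_add_one]
    congr 1
    rw [List.getElem?_eq_getElem (by simpa using by omega)]
    rfl
  have hsum := congrArg List.sum h1
  rw [h2] at hsum
  simp only [List.sum_append, List.sum_cons, List.sum_nil] at hsum
  have hg : (w.drop j)[kn]'(by simpa using by omega : kn < (w.drop j).length) = w[j+kn]'h := by
    simp [List.getElem_drop]
  rw [List.getD_eq_getElem _ _ hj, List.getD_eq_getElem _ _ h]
  unfold winSum
  rw [hg] at hsum
  omega

-- A's while loop computes the running max of all remaining window sums
theorem aloop_char (w : List Int) (kn : Nat) :
    ∀ (fuel j : Nat) (ms : Int), j + kn ≤ w.length → w.length - kn - j ≤ fuel →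
    maxScoreAWhile w (w.length : Int) fuel (winSum w kn j) ms (j : Int) ((j : Int) + (kn : Int) - 1)
      = List.foldl (fun a t => max a (winSum w kn t)) ms (List.range' (j+1) (w.length - kn - j)) := by
  intro fuel
  induction fuel with
  | zero =>
    intro j ms hle hf
    have : w.length - kn - j = 0 := by omega
    simp [maxScoreAWhile, this]
  | succ f ih =>
    intro j ms hle hf
    by_cases hc : j + kn < w.length
    · have hcond : (j : Int) + (kn : Int) - 1 < (w.length : Int) - 1 := by omega
      rw [maxScoreAWhile]
      simp only [if_pos hcond]
      have hidx1 : PySem.List.pyGetD w (j : Int) 0 = w.getD j 0 := PySem.List.pyGetD_natCast w j 0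
      have hidx2 : (j : Int) + (kn : Int) - 1 + 1 = ((j + kn : Nat) : Int) := by push_cast; ring
      rw [hidx2, hidx1, PySem.List.pyGetD_natCast w (j+kn) 0]
      have hcws : winSum w kn j - w.getD j 0 + w.getD (j+kn) 0 = winSum w kn (j+1) :=
        (winSum_slide w kn j hc).symm
      rw [hcws]
      have hl : (j : Int) + 1 = ((j + 1 : Nat) : Int) := by push_cast; ring
      have hr : ((j + kn : Nat) : Int) = ((j + 1 : Nat) : Int) + (kn : Int) - 1 := by push_cast; ring
      rw [hl, hr]
      rw [ih (j+1) (max ms (winSum w kn (j+1))) (by omega) (by omega)]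
      have hcnt : w.length - kn - j = (w.length - kn - (j+1)) + 1 := by omega
      rw [hcnt, List.range'_succ, List.foldl_cons]
    · have hcond : ¬ ((j : Int) + (kn : Int) - 1 < (w.length : Int) - 1) := by omega
      rw [maxScoreAWhile]
      simp only [if_neg hcond]
      have : w.length - kn - j = 0 := by omega
      simp [this]

-- when the loop guard fails at entry, A's loop returns max_score at once
theorem aloop_stop (w : List Int) (n : Int) (fuel : Nat) (cws ms l r : Int)
    (h : ¬ (r < n - 1)) : maxScoreAWhile w n fuel cws ms l r = ms := by
  cases fuel with
  | zero => rfl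
  | succ f => rw [maxScoreAWhile]; simp only [if_neg h]

-- running prefix sums starting from s
def psums (s : Int) : List Int → List Int
  | [] => []
  | x :: xs => (s + x) :: psums (s + x) xs

theorem pref_foldl (l : List Int) :
    ∀ p : List Int, p ≠ [] →
    l.foldl (fun p x => p ++ [PySem.List.pyGetD p (-1) 0 + x]) p
      = p ++ psums (PySem.List.pyGetD p (-1) 0) l := by
  induction l with
  | nil => intro p _; simp [psums]
  | cons x xs ih =>
    intro p hp
    rw [List.foldl_cons]
    obtain ⟨q, y, rfl⟩ : ∃ q y, p = q ++ [y] := by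
      rcases List.eq_nil_or_concat p with h | ⟨q, y, h⟩
      · exact absurd h hp
      · exact ⟨q, y, by simpa [List.concat_eq_append] using h⟩
    rw [ih ((q ++ [y]) ++ [PySem.List.pyGetD (q ++ [y]) (-1) 0 + x]) (by simp)]
    simp only [PySem.List.pyGetD_neg_one_append_singleton]
    rw [psums]
    simp [List.append_assoc]

theorem psums_getD : ∀ (l : List Int) (s : Int) (i : Nat), i < l.length →
    (psums s l).getD i 0 = s + (l.take (i+1)).sum := by
  intro l
  induction l with
  | nil => intro s i h; simp at h
  | cons x xs ih =>
    intro s i h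
    cases i with
    | zero => simp [psums]
    | succ i =>
      rw [psums]
      have : (((s + x) :: psums (s + x) xs).getD (i+1) 0) = (psums (s + x) xs).getD i 0 := rfl
      rw [this, ih (s + x) i (by simp only [List.length_cons] at h; omega)]
      simp [List.take_succ_cons]
      ring

theorem prefix_getD (w : List Int) (i : Nat) (hi : i ≤ w.length) :
    (0 :: psums 0 w).getD i 0 = (w.take i).sum := by
  cases i with
  | zero => simp
  | succ i =>
    have : ((0 :: psums 0 w) : List Int).getD (i+1) 0 = (psums 0 w).getD i 0 := rfl
    rw [this, psums_getD w 0 i (by omega)]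
    simp

theorem winSum_take (w : List Int) (kn j : Nat) :
    (w.take (j + kn)).sum - (w.take j).sum = winSum w kn j := by
  rw [List.take_add, List.sum_append]
  unfold winSum
  ring

theorem pyRange_one_nil (a b : Int) (h : b ≤ a) : PySem.List.pyRange a b 1 = [] := by
  simp [PySem.List.pyRange]; omega

theorem pyRange_cast : ∀ (c s : Nat),
    PySem.List.pyRange (s : Int) ((s + c : Nat) : Int) 1
      = (List.range' s c).map (fun t : Nat => (t : Int)) := by
  intro c
  induction c with
  | zero =>
    intro s
    rw [Nat.add_zero, pyRange_one_nil _ _ le_rfl]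
    rfl
  | succ c ih =>
    intro s
    rw [PySem.List.pyRange_one_cons (by push_cast; omega)]
    have h1 : ((s : Int)) + 1 = ((s + 1 : Nat) : Int) := by push_cast; ring
    have h2 : ((s + (c + 1) : Nat) : Int) = (((s + 1) + c : Nat) : Int) := by push_cast; ring
    rw [h1, h2, ih (s + 1), List.range'_succ]
    rfl

theorem foldl_fun_congr (l : List Nat) (f g : Int → Nat → Int)
    (h : ∀ x ∈ l, ∀ a, f a x = g a x) : ∀ a, List.foldl f a l = List.foldl g a l := by
  induction l with
  | nil => intro a; rfl
  | cons x l ih =>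
    intro a
    rw [List.foldl_cons, List.foldl_cons, h x (by simp)]
    exact ih (fun y hy a => h y (by simp [hy]) a) _

theorem main_equiv (cp : List Int) (k : Int) (h0 : 0 ≤ k) :
    maxScoreSlidingWindow cp k = maxScoreSlidingWindow_alt cp k := by
  obtain ⟨K, rfl⟩ : ∃ K : Nat, k = (K : Int) := ⟨k.toNat, (Int.toNat_of_nonneg h0).symm⟩
  simp only [maxScoreSlidingWindow, maxScoreSlidingWindow_alt]
  set W := PySem.List.slice cp (some (-((K : Nat) : Int))) none
           ++ PySem.List.slice cp none (some ((K : Nat) : Int)) with hWdef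
  -- both ports' first windows are W[:k] = W.take K (clamped)
  have hcws : (PySem.List.slice W none (some ((K : Nat) : Int))).sum = (W.take K).sum := by
    rw [PySem.List.slice_to W (by positivity)]; simp
  -- the prefix-sum list of W
  have hpref : W.foldl (fun p x => p ++ [PySem.List.pyGetD p (-1) 0 + x]) [(0 : Int)]
      = 0 :: psums 0 W := by
    rw [pref_foldl W [(0 : Int)] (by simp)]
    have : PySem.List.pyGetD [(0 : Int)] (-1) 0 = 0 := by
      have := PySem.List.pyGetD_neg_one_append_singleton (xs := ([] : List Int)) (x := (0 : Int)) (d := (0 : Int))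
      simpa using this
    rw [this]
    rfl
  rw [hcws, hpref]
  by_cases hKN : K ≤ W.length
  · -- k ≤ len(window): both sides scan windows 0 .. len - k
    have hA := aloop_char W K W.length 0 (winSum W K 0) (by omega) (by omega)
    simp only [Nat.cast_zero, zero_add] at hA
    have e0 : winSum W K 0 = (W.take K).sum := by simp [winSum]
    rw [e0, Nat.sub_zero] at hA
    rw [hA]
    -- B's starting value: prefix[min(k, n)] = prefix[k]
    have hmin : min ((K : Nat) : Int) ((W.length : Nat) : Int) = ((K : Nat) : Int) := by omega
    rw [hmin, PySem.List.pyGetD_natCast, prefix_getD W K hKN]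
    -- B's range(1, n - k + 1) = [1, …, n - k]
    have hrng : ((W.length : Int) - ((K : Nat) : Int) + 1) = ((1 + (W.length - K) : Nat) : Int) := by
      omega
    have hcast : PySem.List.pyRange 1 ((1 + (W.length - K) : Nat) : Int) 1
        = (List.range' 1 (W.length - K)).map (fun t : Nat => (t : Int)) := by
      simpa using pyRange_cast (W.length - K) 1
    rw [hrng, hcast, List.foldl_map]
    -- both folds take the same values window by window
    have hcong := foldl_fun_congr (List.range' 1 (W.length - K))
      (fun b t => max b (PySem.List.pyGetD (0 :: psums 0 W) ((t : Int) + ((K : Nat) : Int)) 0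
        - PySem.List.pyGetD (0 :: psums 0 W) ((t : Int)) 0))
      (fun a t => max a (winSum W K t))
      (by
        intro t htmem a
        have ht : t + K ≤ W.length := by
          have := (List.mem_range'_1.mp htmem).2
          omega
        simp only
        have hc1 : ((t : Int)) + ((K : Nat) : Int) = ((t + K : Nat) : Int) := by push_cast; ring
        rw [hc1, PySem.List.pyGetD_natCast, PySem.List.pyGetD_natCast,
          prefix_getD W (t + K) ht, prefix_getD W t (by omega), winSum_take])
    rw [hcong]
  · -- k > len(window): no iteration on either side, both return sum(window)
    rw [aloop_stop _ _ _ _ _ _ _ (by omega)]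
    have hmin : min ((K : Nat) : Int) ((W.length : Nat) : Int) = ((W.length : Nat) : Int) := by
      omega
    rw [hmin, PySem.List.pyGetD_natCast, prefix_getD W W.length le_rfl]
    rw [pyRange_one_nil _ _ (by omega)]
    rw [List.take_of_length_le (by omega), List.take_length]
    rfl

-- ===== VERDICT (by name: the statement is the Claim_ definition above) =====
theorem maxScoreSlidingWindow_spec : Claim_equal_maxScoreSlidingWindow := by
  intro cp k _hdom hpre
  exact main_equiv cp k hpre
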